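-- pv_equiv track=rewrite | github.com/Sternstunde4/ChatGLM2_finance | Segmentation0809/segmentation0810.py | replace_tables
-- ===== SOURCE A (Python) =====
-- def replace_tables(parsed_table, new_begin):
--     headers = parsed_table[new_begin]
--     col_headers = headers[1:]
--     extracted_info = []
--     for j, row in enumerate(parsed_table[new_begin + 1:]):
--         if len(row) != len(headers):  # 另一个表格
--             break
--         else:
--             row_header = row[0]
--             for i, col_header in enumerate(col_headers):
--                 value = row[i + 1]
--                 extracted_info.append(f'{row_header}:{col_header}:{value}')
--         new_begin += 1
--     new_begin += 1
--     new_tables = '\n'.join(extracted_info)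
--     return new_tables, new_begin
-- ===== SOURCE B (Python) =====
-- def replace_tables(parsed_table, new_begin):
--     headers = parsed_table[new_begin]
--
--     def emit(rows):
--         # Recursion on the row list: stop at the end or at the first row
--         # whose width differs from the header; pair each data cell with its
--         # column header by zipping the two tails (no index arithmetic).
--         if not rows or len(rows[0]) != len(headers):
--             return [], 0
--         row = rows[0]
--         lines = ['%s:%s:%s' % (row[0], h, v) for h, v in zip(headers[1:], row[1:])]
--         tail_lines, used = emit(rows[1:])
--         return lines + tail_lines, used + 1
--
--     lines, used = emit(parsed_table[new_begin + 1:])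
--     return '\n'.join(lines), new_begin + used + 1
-- ===== Notes on version B (the rewrite author's own statement) =====
-- stated objective: alternative
-- what changed: B is a structural recursion over the row list that pairs each cell with its column header via zip (no enumerate/index arithmetic and no mutable counter), returning the lines and the number of consumed rows together; new_begin is updated once at the end.
-- crash fix: When the header row is empty and is immediately followed by an empty row, A raises IndexError on row[0]; B's zip is empty there, never evaluates row[0], and returns the joined lines with the updated index. — e.g. on replace_tables([[], []], 0): A raises IndexError, B returns ("", 2)
import Mathlib
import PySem

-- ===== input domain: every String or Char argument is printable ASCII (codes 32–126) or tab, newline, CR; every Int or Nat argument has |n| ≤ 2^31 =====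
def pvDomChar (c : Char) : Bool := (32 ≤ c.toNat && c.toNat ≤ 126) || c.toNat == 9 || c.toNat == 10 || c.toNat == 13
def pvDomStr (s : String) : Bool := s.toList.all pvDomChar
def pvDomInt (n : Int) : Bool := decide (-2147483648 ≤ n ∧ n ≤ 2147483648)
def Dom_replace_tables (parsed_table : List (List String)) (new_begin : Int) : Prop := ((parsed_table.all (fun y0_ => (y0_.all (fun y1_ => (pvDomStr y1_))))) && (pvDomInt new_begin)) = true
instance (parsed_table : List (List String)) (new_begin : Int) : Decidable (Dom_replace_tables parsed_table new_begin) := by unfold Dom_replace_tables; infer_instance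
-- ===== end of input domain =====

-- B recurses over the row list and pairs cells with column headers by zip, with no index
-- arithmetic and no mutable counter (objective: alternative decomposition, same cost).


-- ===== PORT A =====
-- A's for-loop with break: structural recursion over the tail rows, carrying
-- (extracted_info, new_begin) exactly as the Python loop does.
def replaceTablesLoopA (headersLen : Nat) (colHeaders : List String) :
    List (List String) → List String → Int → List String × Int
  | [], info, nb => (info, nb)
  | row :: rest, info, nb =>
    if row.length ≠ headersLen then (info, nb)               -- break
    else
      let row_header := (PySem.List.pyGet? row 0).getD ""    -- row[0]; in range on Pre_
      replaceTablesLoopA headersLen colHeaders rest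
        (info ++ (PySem.List.enumerate colHeaders 0).map
          (fun p => row_header ++ ":" ++ p.2 ++ ":" ++ PySem.List.pyGetD row (p.1 + 1) ""))
        (nb + 1)

def replace_tables (parsed_table : List (List String)) (new_begin : Int) : String × Int :=
  let headers := (PySem.List.pyGet? parsed_table new_begin).getD []   -- parsed_table[new_begin]; some on Pre_
  let col_headers := PySem.List.slice headers (some 1) none
  let r := replaceTablesLoopA headers.length col_headers
            (PySem.List.slice parsed_table (some (new_begin + 1)) none) [] new_begin
  (PySem.Str.join "\n" r.1, r.2 + 1)

-- ===== PORT B =====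
-- B's recursive emit: stop at the end or the first width mismatch; zip the two tails;
-- return lines together with the number of consumed rows.
def replaceTablesEmit (headers : List String) : List (List String) → List String × Nat
  | [] => ([], 0)
  | row :: rest =>
    if row.length ≠ headers.length then ([], 0)
    else
      let lines := (List.zip (PySem.List.slice headers (some 1) none)
                             (PySem.List.slice row (some 1) none)).map
        (fun p => (PySem.List.pyGet? row 0).getD "" ++ ":" ++ p.1 ++ ":" ++ p.2)
      let r := replaceTablesEmit headers rest
      (lines ++ r.1, r.2 + 1)

def replace_tables_alt (parsed_table : List (List String)) (new_begin : Int) : String × Int :=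
  let headers := (PySem.List.pyGet? parsed_table new_begin).getD []
  let r := replaceTablesEmit headers (PySem.List.slice parsed_table (some (new_begin + 1)) none)
  (PySem.Str.join "\n" r.1, new_begin + (r.2 : Int) + 1)

-- ===== PRECONDITION & SPEC =====
-- Pre_ excludes exactly the inputs where Python A raises: an out-of-range table index
-- (IndexError on parsed_table[new_begin]) and the corner where the header row is empty
-- and the first following row is the empty row (IndexError on row[0]).
def Pre_replace_tables (parsed_table : List (List String)) (new_begin : Int) : Prop :=
  PySem.Raise.InRange parsed_table.length new_begin ∧
  ((PySem.List.pyGet? parsed_table new_begin).getD [] = [] →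
    (PySem.List.slice parsed_table (some (new_begin + 1)) none).head? ≠ some [])
instance (parsed_table : List (List String)) (new_begin : Int) : Decidable (Pre_replace_tables parsed_table new_begin) := by unfold Pre_replace_tables; infer_instance
def pvWitness_replace_tables : List (List String) × Int :=
  ([["h", "c1", "c2"], ["r1", "a", "b"], ["r2", "x", "y"], ["other"]], 0)

-- On an empty header row followed immediately by an empty row, A raises IndexError on
-- row[0]; B never evaluates row[0] there (the zip is empty) and returns the joined lines.
def Raises_replace_tables (parsed_table : List (List String)) (new_begin : Int) : Prop :=
  PySem.Raise.InRange parsed_table.length new_begin ∧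
  (PySem.List.pyGet? parsed_table new_begin).getD [] = [] ∧
  (PySem.List.slice parsed_table (some (new_begin + 1)) none).head? = some []
instance (parsed_table : List (List String)) (new_begin : Int) : Decidable (Raises_replace_tables parsed_table new_begin) := by unfold Raises_replace_tables; infer_instance
def pvRaiseWitness_replace_tables : List (List String) × Int := ([[], []], 0)
def pvRaiseWitnessOut_replace_tables : String × Int := ("", 2)

def Spec_replace_tables (parsed_table : List (List String)) (new_begin : Int) (out : String × Int) : Prop := out = replace_tables_alt parsed_table new_begin
instance (parsed_table : List (List String)) (new_begin : Int) (out : String × Int) : Decidable (Spec_replace_tables parsed_table new_begin out) := by unfold Spec_replace_tables; infer_instance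

-- ===== CLAIM (what is proved, stated in full; the proofs are below) =====
def Claim_equal_replace_tables : Prop := ∀ (parsed_table : List (List String)) (new_begin : Int), Dom_replace_tables parsed_table new_begin → Pre_replace_tables parsed_table new_begin → Spec_replace_tables parsed_table new_begin (replace_tables parsed_table new_begin)
def Claim_raises_replace_tables : Prop := (∀ (parsed_table : List (List String)) (new_begin : Int), Dom_replace_tables parsed_table new_begin → Raises_replace_tables parsed_table new_begin → ¬ Pre_replace_tables parsed_table new_begin) ∧ (Dom_replace_tables (pvRaiseWitness_replace_tables.1) (pvRaiseWitness_replace_tables.2) ∧ Raises_replace_tables (pvRaiseWitness_replace_tables.1) (pvRaiseWitness_replace_tables.2) ∧ replace_tables_alt (pvRaiseWitness_replace_tables.1) (pvRaiseWitness_replace_tables.2) = pvRaiseWitnessOut_replace_tables)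

-- ===== LEMMAS AND PROOFS =====
-- One row's lines: A's enumerate-and-index form equals B's zip-of-tails form,
-- given that the row has the header's width.
theorem rowlines_eq (headers row : List String) (h : row.length = headers.length) :
    (PySem.List.enumerate (PySem.List.slice headers (some 1) none) 0).map
      (fun p => (PySem.List.pyGet? row 0).getD "" ++ ":" ++ p.2 ++ ":" ++
        PySem.List.pyGetD row (p.1 + 1) "") =
    (List.zip (PySem.List.slice headers (some 1) none)
              (PySem.List.slice row (some 1) none)).map
      (fun p => (PySem.List.pyGet? row 0).getD "" ++ ":" ++ p.1 ++ ":" ++ p.2) := by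
  rw [PySem.List.slice_from_one, PySem.List.slice_from_one]
  apply List.ext_getElem
  · simp [PySem.List.length_enumerate, List.length_zip, List.length_tail, h]
  · intro k hk1 hk2
    have hkh : k < headers.tail.length := by
      simpa [PySem.List.length_enumerate] using hk1
    have hkr : k + 1 < row.length := by
      simp [List.length_tail] at hkh; omega
    simp [PySem.List.getElem_enumerate, List.getElem_zip, List.getElem_tail]
    have : ((k : Int) + 1) = ((k + 1 : Nat) : Int) := by push_cast; ring
    rw [this, PySem.List.pyGetD_natCast]
    simp [hkr]

theorem loopA_eq_emit (headers : List String) (rows : List (List String))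
    (info : List String) (nb : Int) :
    replaceTablesLoopA headers.length (PySem.List.slice headers (some 1) none) rows info nb =
      (info ++ (replaceTablesEmit headers rows).1,
       nb + ((replaceTablesEmit headers rows).2 : Int)) := by
  induction rows generalizing info nb with
  | nil => simp [replaceTablesLoopA, replaceTablesEmit]
  | cons row rest ih =>
    by_cases h : row.length = headers.length
    · rw [replaceTablesLoopA, replaceTablesEmit]
      simp only [h, if_neg (by omega : ¬ headers.length ≠ headers.length)]
      rw [ih, rowlines_eq headers row h]
      simp [List.append_assoc]
      omega
    · simp [replaceTablesLoopA, replaceTablesEmit, h]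

-- ===== VERDICT (by name: the statement is the Claim_ definition above) =====
theorem replace_tables_spec : Claim_equal_replace_tables := by
  intro pt nb _ _
  show _ = _
  simp [replace_tables, replace_tables_alt, loopA_eq_emit]

def replace_tables_raises : Claim_raises_replace_tables := by
  unfold Claim_raises_replace_tables
  refine ⟨?_, by decide⟩
  intro pt nb _ hr hp
  exact hp.2 hr.2.1 hr.2.2
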